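-- pv_equiv track=rewrite | github.com/YaelAguilar/compiladores-act.2.3 | app.py | analyze_semantics
-- ===== SOURCE A (Python) =====
-- def analyze_semantics(tokens):
--     essential_elements = ['<html>', '<head>', '<title>', '<body>']
--     missing_elements = []
--     for element in essential_elements:
--         found = False
--         for token, token_type in tokens:
--             if token.lower().startswith(element):
--                 found = True
--                 break
--         if not found:
--             missing_elements.append(f"Falta el elemento esencial: {element}")
--     return missing_elements
-- ===== SOURCE B (Python) =====
-- def analyze_semantics(tokens):
--     essential_elements = ['<html>', '<head>', '<title>', '<body>']
--     found = set()
--     for token, token_type in tokens: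
--         low = token.lower()
--         for element in essential_elements:
--             if low.startswith(element):
--                 found.add(element)
--     return [f"Falta el elemento esencial: {element}"
--             for element in essential_elements if element not in found]
-- ===== Notes on version B (the rewrite author's own statement) =====
-- stated objective: alternative
-- what changed: Inverts the loop nesting: a single pass over tokens builds a 'found' set of satisfied essential elements, then the missing-element messages are emitted in the fixed element order, instead of one full scan of tokens per essential element with an early break.
import Mathlib
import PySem

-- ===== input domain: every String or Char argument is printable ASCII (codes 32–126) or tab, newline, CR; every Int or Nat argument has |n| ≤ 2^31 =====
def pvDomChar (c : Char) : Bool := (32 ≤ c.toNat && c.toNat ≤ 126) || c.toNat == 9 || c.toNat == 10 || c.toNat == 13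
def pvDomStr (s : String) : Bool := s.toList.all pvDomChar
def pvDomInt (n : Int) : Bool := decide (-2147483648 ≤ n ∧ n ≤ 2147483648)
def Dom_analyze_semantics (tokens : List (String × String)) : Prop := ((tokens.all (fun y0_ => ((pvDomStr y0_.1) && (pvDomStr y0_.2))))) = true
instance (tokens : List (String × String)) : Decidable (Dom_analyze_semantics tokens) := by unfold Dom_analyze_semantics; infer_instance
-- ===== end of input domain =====

-- B inverts the loop nesting: one pass over tokens builds a set of satisfied essential
-- elements; the missing-element messages are then emitted in the fixed element order.
-- ===== PORT A =====
def analyze_semantics (tokens : List (String × String)) : List String :=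
  let essential_elements := ["<html>", "<head>", "<title>", "<body>"]
  essential_elements.foldl (fun missing_elements element =>
    -- inner 'for token, token_type in tokens' with break: boolean fold, stays True once found
    let found := tokens.foldl (fun found tp =>
      if found then found
      else PySem.Str.startswith (PySem.Str.lower tp.1) element) false
    if !found then missing_elements ++ ["Falta el elemento esencial: " ++ element]
    else missing_elements) []

-- ===== PORT B =====
def analyze_semantics_alt (tokens : List (String × String)) : List String :=
  let essential_elements := ["<html>", "<head>", "<title>", "<body>"]
  let found : PySem.Set String := tokens.foldl (fun s tp =>
    let low := PySem.Str.lower tp.1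
    essential_elements.foldl (fun s element =>
      if PySem.Str.startswith low element then PySem.Set.add s element else s) s)
    PySem.Set.empty
  essential_elements.filterMap (fun element =>
    if PySem.Set.contains found element then none
    else some ("Falta el elemento esencial: " ++ element))

-- ===== PRECONDITION & SPEC =====
def Spec_analyze_semantics (tokens : List (String × String)) (out : List String) : Prop := out = analyze_semantics_alt tokens
instance (tokens : List (String × String)) (out : List String) : Decidable (Spec_analyze_semantics tokens out) := by unfold Spec_analyze_semantics; infer_instance

-- ===== CLAIM (what is proved, stated in full; the proofs are below) =====
def Claim_equal_analyze_semantics : Prop := ∀ (tokens : List (String × String)), Dom_analyze_semantics tokens → Spec_analyze_semantics tokens (analyze_semantics tokens)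

-- ===== LEMMAS AND PROOFS =====

-- ===== VERDICT (by name: the statement is the Claim_ definition above) =====
theorem contains_inner (els : List String) (p : String → Bool) (s : PySem.Set String) (e : String) :
    PySem.Set.contains
      (els.foldl (fun s el => if p el then PySem.Set.add s el else s) s) e
    = (PySem.Set.contains s e || els.any (fun el => decide (e = el) && p el)) := by
  induction els generalizing s with
  | nil => simp
  | cons x xs ih =>
    simp only [List.foldl, List.any_cons, ih]
    by_cases hp : p x <;>
      simp [hp, Bool.or_assoc, Bool.or_comm, Bool.or_left_comm]
theorem contains_found (q : String × String → String → Bool) (els : List String)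
    (tokens : List (String × String)) (s : PySem.Set String) (e : String) :
    PySem.Set.contains
      (tokens.foldl (fun s tp =>
        els.foldl (fun s el => if q tp el then PySem.Set.add s el else s) s) s) e
    = (PySem.Set.contains s e || tokens.any (fun tp => els.any (fun el => decide (e = el) && q tp el))) := by
  induction tokens generalizing s with
  | nil => simp
  | cons t ts ih =>
    simp only [List.foldl, List.any_cons, ih, contains_inner, Bool.or_assoc]
theorem foldl_break_any (p : String × String → Bool) (tokens : List (String × String)) (b : Bool) :
    tokens.foldl (fun found tp => if found then found else p tp) b = (b || tokens.any p) := by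
  induction tokens generalizing b with
  | nil => simp
  | cons t ts ih => cases b <;> simp [List.foldl, ih]


-- ===== VERDICT (by name: the statement is the Claim_ definition above) =====
theorem analyze_semantics_spec : Claim_equal_analyze_semantics := by
  intro tokens _
  unfold Spec_analyze_semantics
  unfold analyze_semantics analyze_semantics_alt
  simp only [contains_found (fun tp el => PySem.Str.startswith (PySem.Str.lower tp.1) el)
      ["<html>", "<head>", "<title>", "<body>"]]
  simp only [List.filterMap, List.foldl, foldl_break_any, Bool.false_or, PySem.Set.contains,
    PySem.Set.empty, List.contains_nil, decide_false, Bool.false_or, List.any_cons, List.any_nil,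
    Bool.or_false, String.reduceEq, decide_true, Bool.true_and, Bool.false_and, Bool.or_false,
    Bool.false_or]
  cases h1 : tokens.any (fun tp => PySem.Str.startswith (PySem.Str.lower tp.1) "<html>") <;>
  cases h2 : tokens.any (fun tp => PySem.Str.startswith (PySem.Str.lower tp.1) "<head>") <;>
  cases h3 : tokens.any (fun tp => PySem.Str.startswith (PySem.Str.lower tp.1) "<title>") <;>
  cases h4 : tokens.any (fun tp => PySem.Str.startswith (PySem.Str.lower tp.1) "<body>") <;>
    rfl
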